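-- pv_equiv track=rewrite | github.com/yeele/aoj | atc/abc_117_d_xor.py | sol_naive
-- ===== SOURCE A (Python) =====
-- def sol_naive(k, S):
--     maxi = 0
--     for x in range(k+1):
--         ttl = 0
--         for s in S:
--             ttl += (x ^ s)
--         maxi = max(maxi, ttl)
--     return maxi
-- ===== SOURCE B (Python) =====
-- def sol_naive(k, S):
--     # total(x) = sum(S) + sum over set bits b of x of w[b],
--     # where w[b] = (len(S) - 2*#{s : bit b of s set}) << b.
--     base = sum(S)
--     nbits = k.bit_length()
--     n = len(S)
--     w = [((n - 2 * sum((s >> b) & 1 for s in S)) << b) for b in range(nbits)]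
--     best = 0
--     for x in range(k + 1):
--         t = base
--         for b in range(nbits):
--             if (x >> b) & 1:
--                 t += w[b]
--         best = max(best, t)
--     return best
-- ===== Notes on version B (the rewrite author's own statement) =====
-- stated objective: faster
-- what changed: Instead of re-scanning S for every candidate x, B precomputes per-bit weights w[b] = (len(S)-2*count of set bits b)<<b in one pass over S, so each x in 0..k is scored over the bits of k rather than over S.
import Mathlib
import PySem

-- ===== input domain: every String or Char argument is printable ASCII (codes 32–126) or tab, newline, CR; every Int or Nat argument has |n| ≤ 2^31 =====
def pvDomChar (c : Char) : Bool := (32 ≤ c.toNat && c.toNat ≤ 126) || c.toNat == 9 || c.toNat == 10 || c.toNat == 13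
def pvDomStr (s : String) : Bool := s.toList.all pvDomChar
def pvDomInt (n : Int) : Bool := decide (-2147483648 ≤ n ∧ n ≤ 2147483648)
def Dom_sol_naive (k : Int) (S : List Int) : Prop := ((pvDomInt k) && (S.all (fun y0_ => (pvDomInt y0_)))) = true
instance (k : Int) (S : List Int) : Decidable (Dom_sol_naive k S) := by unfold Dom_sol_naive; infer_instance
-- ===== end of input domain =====

-- B replaces A's inner scan over S by per-bit weights precomputed once,
-- so each candidate x is scored over the bits of k instead of over S.

-- ===== PORT A =====
def sol_naive (k : Int) (S : List Int) : Int :=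
  (PySem.List.pyRange 0 (k + 1)).foldl
    (fun maxi x =>
      max maxi (S.foldl (fun ttl s => ttl + PySem.Int.bxor x s) 0))
    0

-- ===== PORT B =====
-- B-side helpers, each a literal transliteration of one expression of Source B:
-- (y >> b) & 1  (the shift count b comes from range(-), hence is nonnegative and .toNat is exact)
def pvBit (y : Int) (b : Nat) : Int := PySem.Int.band (y >>> (b : Int)) 1
-- (len(S) - 2*sum((s >> b) & 1 for s in S)) << b   (one element of the comprehension w)
def pvWeight (S : List Int) (b : Int) : Int :=
  ((S.length : Int) - 2 * S.foldl (fun acc s => acc + pvBit s b.toNat) 0) <<< b.toNat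
-- the body of the inner loop:  if (x >> b) & 1: t += w[b]
def pvScore (x : Int) (w : List Int) (t : Int) (b : Int) : Int :=
  if pvBit x b.toNat ≠ 0 then t + PySem.List.pyGetD w b 0 else t

def sol_naive_alt (k : Int) (S : List Int) : Int :=
  let base : Int := S.foldl (· + ·) 0                       -- base = sum(S)
  let nbits : Int := (PySem.Int.bitLength k : Nat)          -- nbits = k.bit_length()
  let w : List Int := (PySem.List.pyRange 0 nbits).map (pvWeight S)   -- the comprehension
  (PySem.List.pyRange 0 (k + 1)).foldl
    (fun best x => max best ((PySem.List.pyRange 0 nbits).foldl (pvScore x w) base))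
    0

-- ===== PRECONDITION & SPEC =====
def Spec_sol_naive (k : Int) (S : List Int) (out : Int) : Prop := out = sol_naive_alt k S
instance (k : Int) (S : List Int) (out : Int) : Decidable (Spec_sol_naive k S out) := by
  unfold Spec_sol_naive; infer_instance

-- ===== CLAIM (what is proved, stated in full; the proofs are below) =====
def Claim_equal_sol_naive : Prop := ∀ (k : Int) (S : List Int), Dom_sol_naive k S → Spec_sol_naive k S (sol_naive k S)

-- ===== LEMMAS AND PROOFS =====

-- folding `acc + f s` is `init + sum of the mapped list`
theorem pvFoldlAdd {α : Type} (f : α → Int) (S : List α) (c : Int) :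
    S.foldl (fun acc s => acc + f s) c = c + (S.map f).sum := by
  induction S generalizing c with
  | nil => simp
  | cons s S ih => simp [ih]; ring

theorem pvBit_natCast (m : Nat) (b : Nat) : pvBit (m : Int) b = ((m / 2 ^ b % 2 : Nat) : Int) := by
  unfold pvBit
  rw [Int.shiftRight_natCast_right]
  have h1 : ((m : Int) >>> b) = ((m >>> b : Nat) : Int) := by simp
  rw [h1]
  have h2 := PySem.Int.band_natCast (m >>> b) 1
  simp only [Nat.cast_one] at h2
  rw [h2]
  simp [Nat.and_one_is_mod, Nat.shiftRight_eq_div_pow]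

theorem pvBit_negSucc (m : Nat) (b : Nat) :
    pvBit (Int.negSucc m) b = 1 - ((m / 2 ^ b % 2 : Nat) : Int) := by
  unfold pvBit
  rw [Int.shiftRight_natCast_right]
  have h1 : ((Int.negSucc m) >>> b) = Int.negSucc (m >>> b) := rfl
  rw [h1]
  have hdm : m / 2 ^ b % 2 = (m >>> b) % 2 := by rw [Nat.shiftRight_eq_div_pow]
  rw [hdm]
  generalize m >>> b = z
  have hneg : ¬ (0 ≤ Int.negSucc z) := by simp [Int.negSucc_not_nonneg]
  rw [PySem.Int.band]
  rw [if_neg hneg, if_pos (by norm_num : (0:Int) ≤ 1)]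
  have h2 : (-(Int.negSucc z) - 1).toNat = z := by simp [Int.neg_negSucc]
  rw [h2]
  have h3 : Int.toNat 1 &&& z = z % 2 := by
    rw [(rfl : Int.toNat 1 = 1), Nat.and_comm]; exact Nat.and_one_is_mod z
  rw [h3, (rfl : Int.toNat 1 = 1)]
  have h4 : z % 2 ≤ 1 := by omega
  omega

theorem pvBit_zero_or_one (y : Int) (b : Nat) : pvBit y b = 0 ∨ pvBit y b = 1 := by
  cases y with
  | ofNat m =>
    have h := pvBit_natCast m b
    rw [Int.ofNat_eq_natCast, h]
    rcases Nat.mod_two_eq_zero_or_one (m / 2 ^ b) with hh | hh <;> simp [hh]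
  | negSucc m =>
    rw [pvBit_negSucc]
    rcases Nat.mod_two_eq_zero_or_one (m / 2 ^ b) with hh | hh <;> simp [hh]

-- core identity at Nat level: xor as a sum over flipped bit positions
theorem pvNatCore (N : Nat) : ∀ (a m : Nat), a < 2 ^ N →
    ((a ^^^ m : Nat) : Int) =
      (m : Int) + ∑ b ∈ Finset.range N,
        ((a / 2 ^ b % 2 : Nat) : Int) * (1 - 2 * ((m / 2 ^ b % 2 : Nat) : Int)) * 2 ^ b := by
  induction N with
  | zero =>
    intro a m ha
    have : a = 0 := by omega
    subst this
    simp [Nat.zero_xor]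
  | succ N ih =>
    intro a m ha
    have ha2 : a / 2 < 2 ^ N := by
      have := Nat.pow_succ 2 N
      omega
    have hIH := ih (a / 2) (m / 2) ha2
    rw [Finset.sum_range_succ']
    have hshift : ∀ (y b : Nat), y / 2 ^ (b + 1) = (y / 2) / 2 ^ b := by
      intro y b
      rw [Nat.pow_succ', Nat.div_div_eq_div_mul]
    have hsum : ∑ b ∈ Finset.range N,
        ((a / 2 ^ (b+1) % 2 : Nat) : Int) * (1 - 2 * ((m / 2 ^ (b+1) % 2 : Nat) : Int)) * 2 ^ (b+1)
        = 2 * ∑ b ∈ Finset.range N,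
        (((a/2) / 2 ^ b % 2 : Nat) : Int) * (1 - 2 * (((m/2) / 2 ^ b % 2 : Nat) : Int)) * 2 ^ b := by
      rw [Finset.mul_sum]
      apply Finset.sum_congr rfl
      intro b _
      rw [hshift a b, hshift m b]
      ring
    rw [hsum]
    have hdecomp : (a ^^^ m) = 2 * ((a/2) ^^^ (m/2)) + (a + m) % 2 := by
      have hx1 : (a ^^^ m) / 2 = (a/2) ^^^ (m/2) := Nat.xor_div_two
      have hx2 : (a ^^^ m) % 2 = (a + m) % 2 := Nat.xor_mod_two_eq
      omega
    rw [hdecomp]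
    simp only [pow_zero, Nat.div_one, mul_one]
    rcases Nat.mod_two_eq_zero_or_one a with hA | hA <;>
      rcases Nat.mod_two_eq_zero_or_one m with hM | hM <;>
      rw [hA, hM] <;> push_cast <;> rw [hIH] <;> push_cast <;> omega

-- per-pair identity at Int level: x ^ s = s + Σ_b bit_b(x)·(1 − 2·bit_b(s))·2^b
theorem pvPair (N : Nat) (x s : Int) (hx : 0 ≤ x) (hlt : x.natAbs < 2 ^ N) :
    PySem.Int.bxor x s =
      s + ∑ b ∈ Finset.range N, pvBit x b * (1 - 2 * pvBit s b) * 2 ^ b := by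
  lift x to Nat using hx with a
  have hlt' : a < 2 ^ N := by simpa using hlt
  cases s with
  | ofNat m =>
    have hm : (Int.ofNat m) = ((m : Nat) : Int) := rfl
    rw [hm, PySem.Int.bxor_natCast]
    rw [pvNatCore N a m hlt']
    apply congrArg
    apply Finset.sum_congr rfl
    intro b _
    rw [pvBit_natCast, pvBit_natCast]
  | negSucc m =>
    have hbx : PySem.Int.bxor (a : Int) (Int.negSucc m) = -((a ^^^ m : Nat) : Int) - 1 := by
      rw [PySem.Int.bxor]
      rw [if_pos (by positivity : (0:Int) ≤ (a:Int)),
          if_neg (by simp [Int.negSucc_not_nonneg] : ¬ (0:Int) ≤ Int.negSucc m)]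
      simp [Int.neg_negSucc]
    rw [hbx]
    have hsum : ∑ b ∈ Finset.range N, pvBit (a:Int) b * (1 - 2 * pvBit (Int.negSucc m) b) * 2 ^ b
        = -∑ b ∈ Finset.range N,
            ((a / 2 ^ b % 2 : Nat) : Int) * (1 - 2 * ((m / 2 ^ b % 2 : Nat) : Int)) * 2 ^ b := by
      rw [← Finset.sum_neg_distrib]
      apply Finset.sum_congr rfl
      intro b _
      rw [pvBit_natCast, pvBit_negSucc]
      ring
    rw [hsum, Int.negSucc_eq]
    have := pvNatCore N a m hlt'
    linarith

-- swap a list sum with a Finset.range sum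
theorem pvSumSwap (S : List Int) (N : Nat) (h : Int → Nat → Int) :
    (S.map (fun s => ∑ b ∈ Finset.range N, h s b)).sum
      = ∑ b ∈ Finset.range N, (S.map (fun s => h s b)).sum := by
  induction S with
  | nil => simp
  | cons s S ih => simp [ih, Finset.sum_add_distrib]

-- sum of a pointwise-shifted list
theorem pvSumAddPointwise (S : List Int) (g : Int → Int) :
    (S.map (fun s => s + g s)).sum = S.sum + (S.map g).sum := by
  induction S with
  | nil => simp
  | cons s S ih => simp only [List.map_cons, List.sum_cons, ih]; ring

-- sum of an affine image of a list
theorem pvSumAffine (S : List Int) (c d : Int) (q : Int → Int) :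
    (S.map (fun s => c - d * q s)).sum = (S.length : Int) * c - d * (S.map q).sum := by
  induction S with
  | nil => simp
  | cons s S ih => simp [ih]; ring

-- list-range sums are Finset.range sums
theorem pvRangeSum (N : Nat) (f : Nat → Int) :
    ((List.range N).map f).sum = ∑ b ∈ Finset.range N, f b := by
  induction N with
  | zero => simp
  | succ N ih => rw [List.range_succ, Finset.sum_range_succ]; simp [ih]

-- A's inner total for a fixed x equals the bit-weighted total
theorem pvTotal (k : Int) (S : List Int) (x : Int) (hx0 : 0 ≤ x) (hxk : x ≤ k) :
    S.foldl (fun ttl s => ttl + PySem.Int.bxor x s) 0 =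
      S.foldl (· + ·) 0 +
        ∑ b ∈ Finset.range (PySem.Int.bitLength k),
          pvBit x b * (((S.length : Int) - 2 * (S.map (fun s => pvBit s b)).sum) * 2 ^ b) := by
  set N := PySem.Int.bitLength k with hN
  have hxlt : x.natAbs < 2 ^ N := by
    have hk : k.natAbs < 2 ^ N := PySem.Int.lt_two_pow_bitLength k
    have hle : x.natAbs ≤ k.natAbs := by omega
    omega
  rw [pvFoldlAdd (fun s => PySem.Int.bxor x s) S 0, zero_add]
  have hmap : S.map (fun s => PySem.Int.bxor x s)
      = S.map (fun s => s + ∑ b ∈ Finset.range N, pvBit x b * (1 - 2 * pvBit s b) * 2 ^ b) := by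
    apply List.map_congr_left
    intro s _
    exact pvPair N x s hx0 hxlt
  rw [hmap, pvSumAddPointwise, pvSumSwap]
  have hbase : S.foldl (· + ·) 0 = S.sum := by simp [List.sum_eq_foldl]
  rw [hbase]
  apply congrArg
  apply Finset.sum_congr rfl
  intro b _
  have hterm : (S.map (fun s => pvBit x b * (1 - 2 * pvBit s b) * 2 ^ b)).sum
      = (S.map (fun s => (pvBit x b * 2 ^ b) - (pvBit x b * 2 ^ b * 2) * pvBit s b)).sum := by
    apply congrArg
    apply List.map_congr_left
    intro s _
    ring
  rw [hterm, pvSumAffine]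
  ring

-- B's inner fold for a fixed x equals the same bit-weighted total
theorem pvInner (k : Int) (S : List Int) (x : Int) :
    (PySem.List.pyRange 0 ((PySem.Int.bitLength k : Nat) : Int)).foldl
        (pvScore x ((PySem.List.pyRange 0 ((PySem.Int.bitLength k : Nat) : Int)).map (pvWeight S)))
        (S.foldl (· + ·) 0)
      = S.foldl (· + ·) 0 +
        ∑ b ∈ Finset.range (PySem.Int.bitLength k),
          pvBit x b * (((S.length : Int) - 2 * (S.map (fun s => pvBit s b)).sum) * 2 ^ b) := by
  set N := PySem.Int.bitLength k with hN
  have hstep : (PySem.List.pyRange 0 ((N : Nat) : Int)).foldl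
      (pvScore x ((PySem.List.pyRange 0 ((N : Nat) : Int)).map (pvWeight S))) (S.foldl (· + ·) 0)
      = (PySem.List.pyRange 0 ((N : Nat) : Int)).foldl
      (fun t b => t + pvBit x b.toNat * (((S.length : Int) - 2 * (S.map (fun s => pvBit s b.toNat)).sum) * 2 ^ b.toNat))
      (S.foldl (· + ·) 0) := by
    apply PySem.List.foldl_congr_mem
    intro t b hb
    obtain ⟨hb0, hbN⟩ := PySem.List.mem_pyRange_one.mp hb
    have hgetd : PySem.List.pyGetD ((PySem.List.pyRange 0 ((N : Nat) : Int)).map (pvWeight S)) b 0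
        = pvWeight S b :=
      PySem.List.pyGetD_map_pyRange_of_nonneg (pvWeight S) _ b 0 hb0 hbN
    have hweight : pvWeight S b
        = (((S.length : Int) - 2 * (S.map (fun s => pvBit s b.toNat)).sum) * 2 ^ b.toNat) := by
      unfold pvWeight
      rw [pvFoldlAdd (fun s => pvBit s b.toNat) S 0, zero_add]
      have hcast : ((b.toNat : Nat) : Int) = b := Int.toNat_of_nonneg hb0
      calc ((S.length : Int) - 2 * (S.map (fun s => pvBit s b.toNat)).sum) <<< b.toNat
          = ((S.length : Int) - 2 * (S.map (fun s => pvBit s b.toNat)).sum) <<< ((b.toNat : Nat) : Int) :=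
            (Int.shiftLeft_natCast_right _ _).symm
        _ = ((S.length : Int) - 2 * (S.map (fun s => pvBit s b.toNat)).sum) * ((2 ^ b.toNat : Nat) : Int) :=
            Int.shiftLeft_eq_mul_pow _ _
        _ = _ := by push_cast; ring
    unfold pvScore
    rcases pvBit_zero_or_one x b.toNat with h0 | h1
    · rw [if_neg (by simp [h0]), h0]
      ring
    · rw [if_pos (by simp [h1]), hgetd, hweight, h1]
      ring
  rw [hstep]
  rw [pvFoldlAdd (fun b : Int => pvBit x b.toNat * (((S.length : Int) - 2 * (S.map (fun s => pvBit s b.toNat)).sum) * 2 ^ b.toNat)) _ _]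
  apply congrArg
  rw [PySem.List.pyRange_zero_natCast, List.map_map]
  rw [pvRangeSum N _]
  apply Finset.sum_congr rfl
  intro b _
  simp [Function.comp]

-- ===== VERDICT (by name: the statement is the Claim_ definition above) =====
theorem sol_naive_spec : Claim_equal_sol_naive := by
  intro k S _
  unfold Spec_sol_naive sol_naive sol_naive_alt
  apply PySem.List.foldl_congr_mem
  intro acc x hxmem
  obtain ⟨hx0, hxlt⟩ := PySem.List.mem_pyRange_one.mp hxmem
  have hxk : x ≤ k := by omega
  apply congrArg
  rw [pvTotal k S x hx0 hxk]
  exact (pvInner k S x).symm
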